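-- pv_equiv track=rewrite | github.com/gradgrind/WZS | program/old/tt_base.py | simplify_room_lists
-- ===== SOURCE A (Python) =====
-- from typing import NamedTuple, Optional
--
-- def simplify_room_lists(roomlists: list[list[int]]) -> Optional[
--     tuple[
--         list[int],          # required single rooms
--         list[list[int]],    # fixed room choices
--         list[list[int]]     # flexible room choices
--     ]
-- ]:
--     """Simplify room lists, where possible, and check for room conflicts.
--
--     The basic room specifications for the individual "tlessons" are
--     processed into three separate lists (see result type).
--     The number of entries in <roomlist> is taken to be the number of
--     distinct rooms needed.
--     This approach is in some respects not ideal, but given the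
--     difficulties of specifying concisely the room requirements for
--     blocks containing multiple courses, it seemed a reasonable compromise.
--     """
--     ## Collect single room "choices" and remove redundant entries
--     srooms = [] # (single) fixed room
--     rooms = []  # "normal" room choice list
--     xrooms = [] # "flexible" room choice list (with '+')
--     for rchoice in roomlists:
--         if rchoice[-1] == 0:    # '+'
--             xrooms.append(rchoice[:-1])
--         elif len(rchoice) == 1:
--             r = rchoice[0]
--             if r in srooms:
--                 return None     # Internal conflict!
--             srooms.append(r)
--         else:
--             rooms.append(rchoice)
--     i = 0
--     while i < len(srooms):
--         # Filter already-claimed rooms from the choice lists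
--         r = srooms[i]
--         i += 1
--         rooms_1 = []    # temporary buffer for rebuilding <rooms>
--         for rlist in rooms:
--             try:
--                 rlist.remove(r)
--             except ValueError:
--                 rooms_1.append(rlist)
--             else:
--                 if len(rlist) == 1:
--                     rx = rlist[0]
--                     if rx in srooms:
--                         return None
--                     # Add to list of single rooms
--                     srooms.append(rx)
--                 else:
--                     rooms_1.append(rlist)
--         rooms = rooms_1
--         # Filter already claimed rooms from the flexible choices
--         for rlist in xrooms:
--             try:
--                 rlist.remove(r)
--             except ValueError:
--                 continue
--     # Sort according to list length
--     rl1 = [(len(rl), rl) for rl in rooms]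
--     rl2 = [(len(rl), rl) for rl in xrooms]
--     rl1.sort()
--     rl2.sort()
--     return (
--         srooms,
--         [rl[1] for rl in rl1],
--         [rl[1] for rl in rl2]
--     )
-- ===== SOURCE B (Python) =====
-- # Different algorithm: unit propagation via an inverted room->list-indices index and a
-- # worklist, touching only lists that contain the claimed room; choice-list filtering for
-- # flexible lists is deferred to one single pass at the end.  (A mutates its argument's
-- # inner lists in place; B does not — the equivalence claimed is about the return value.)
-- def simplify_room_lists(roomlists):
--     srooms = []         # claimed single rooms, in discovery order
--     claimed = set()     # same rooms, as a set
--     rooms0 = []         # original multi-room choice lists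
--     xrooms0 = []        # original flexible choice lists (without the trailing 0)
--     for rc in roomlists:
--         if rc[-1] == 0:
--             xrooms0.append(rc[:-1])
--         elif len(rc) == 1:
--             r = rc[0]
--             if r in claimed:
--                 return None
--             claimed.add(r)
--             srooms.append(r)
--         else:
--             rooms0.append(rc)
--     # live choice lists by original position; inverted index room -> positions
--     live = {}
--     index = {}
--     for j, rl in enumerate(rooms0):
--         live[j] = rl
--         for rr in dict.fromkeys(rl):
--             index.setdefault(rr, []).append(j)
--     qi = 0
--     while qi < len(srooms):
--         r = srooms[qi]
--         qi += 1
--         for j in index.get(r, []):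
--             rl = live.get(j)
--             if rl is None:
--                 continue
--             rl2 = rl.copy()
--             rl2.remove(r)       # r is present: j is indexed under r and r was never claimed before
--             if len(rl2) == 1:
--                 rx = rl2[0]
--                 if rx in claimed:
--                     return None
--                 claimed.add(rx)
--                 srooms.append(rx)
--                 del live[j]
--             else:
--                 live[j] = rl2
--     # one pass over each flexible list: drop the first occurrence of every claimed room
--     xrooms = []
--     for xl in xrooms0:
--         out = []
--         seen = set()
--         for x in xl:
--             if x in claimed and x not in seen:
--                 seen.add(x)
--             else:
--                 out.append(x)
--         xrooms.append(out)
--     rooms = list(live.values())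
--     rooms.sort(key=lambda l: (len(l), l))
--     xrooms.sort(key=lambda l: (len(l), l))
--     return (srooms, rooms, xrooms)
-- ===== Notes on version B (the rewrite author's own statement) =====
-- stated objective: alternative
-- what changed: Replaces A's repeated rescans of all choice lists per claimed room with unit propagation over an inverted room-to-list-indices index plus a worklist (only lists containing the claimed room are touched), and filters the flexible lists in one single final pass instead of once per claimed room.
-- outside the precondition, e.g. on simplify_room_lists([[1], [1], []]): A returns None, B returns None
import Mathlib
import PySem

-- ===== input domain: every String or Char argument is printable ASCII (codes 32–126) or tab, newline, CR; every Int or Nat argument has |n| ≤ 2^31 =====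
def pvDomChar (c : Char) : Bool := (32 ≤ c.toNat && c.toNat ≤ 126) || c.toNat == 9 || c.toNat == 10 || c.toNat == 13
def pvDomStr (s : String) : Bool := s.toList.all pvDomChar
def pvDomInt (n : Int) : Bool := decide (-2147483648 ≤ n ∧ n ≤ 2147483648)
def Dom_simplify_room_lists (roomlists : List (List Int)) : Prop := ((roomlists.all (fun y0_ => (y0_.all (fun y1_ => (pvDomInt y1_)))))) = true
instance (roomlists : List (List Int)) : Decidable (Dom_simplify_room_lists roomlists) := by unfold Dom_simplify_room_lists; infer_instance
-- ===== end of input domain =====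

-- B changes the algorithm: unit propagation over an inverted room→list index with a worklist,
-- flexible lists filtered in one final pass (objective: alternative).  A mutates its argument's inner
-- lists in place, B does not — the equivalence proved is about the return value only.

-- ===== PORT A =====
-- the inner `for rlist in rooms:` pass of the while loop (rebuilds <rooms>, may extend <srooms>)
def passA (r : Int) : List (List Int) → List (List Int) → List Int → Option (List (List Int) × List Int)
  | [], rooms1, s => some (rooms1, s)
  | rl :: rest, rooms1, s =>
    match PySem.List.remove? rl r with
    | none => passA r rest (rooms1 ++ [rl]) s          -- ValueError: keep the list
    | some rl2 =>
      if rl2.length = 1 then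
        if s.contains (PySem.List.pyGetD rl2 0 0) then none   -- rx in srooms: conflict
        else passA r rest rooms1 (s ++ [PySem.List.pyGetD rl2 0 0])
      else passA r rest (rooms1 ++ [rl2]) s

-- termination fact for the while loop (cited in decreasing_by)
lemma passA_conserve (r : Int) : ∀ (rooms rooms1 : List (List Int)) (s : List Int)
    (out : List (List Int) × List Int), passA r rooms rooms1 s = some out →
    out.1.length + out.2.length = rooms.length + rooms1.length + s.length := by
  intro rooms
  induction rooms with
  | nil => intro rooms1 s out h; cases h; simp
  | cons rl rest ih =>
    intro rooms1 s out h
    cases hrm : PySem.List.remove? rl r with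
    | none =>
      simp only [passA, hrm] at h
      have := ih _ _ _ h; simp at this ⊢; omega
    | some rl2 =>
      simp only [passA, hrm] at h
      by_cases h1 : rl2.length = 1
      · rw [if_pos h1] at h
        by_cases h2 : s.contains (PySem.List.pyGetD rl2 0 0) = true
        · rw [if_pos h2] at h; cases h
        · rw [if_neg h2] at h
          have := ih _ _ _ h; simp at this ⊢; omega
      · rw [if_neg h1] at h
        have := ih _ _ _ h; simp at this ⊢; omega

-- `rl1 = [(len(rl), rl) for rl in …]; rl1.sort(); [rl[1] for rl in rl1]`
def sortPairsA (xs : List (List Int)) : List (List Int) :=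
  (PySem.List.sorted2 (xs.map (fun rl => (PySem.List.len rl, rl)))
      (fun p => p.1) (fun p => p.2) false).map (fun p => p.2)

-- `while i < len(srooms): …`
def whileA (srooms : List Int) (i : Nat) (rooms xrooms : List (List Int)) :
    Option (List Int × List (List Int) × List (List Int)) :=
  if h : i < srooms.length then
    match hp : passA srooms[i] rooms [] srooms with
    | none => none
    | some (rooms', srooms') =>
      whileA srooms' (i + 1) rooms'
        (xrooms.map (fun xl => (PySem.List.remove? xl srooms[i]).getD xl))
  else
    some (srooms, sortPairsA rooms, sortPairsA xrooms)
termination_by srooms.length + rooms.length - i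
decreasing_by
  have h2 := passA_conserve srooms[i] rooms [] srooms _ hp
  simp at h2; omega

-- the first `for rchoice in roomlists:` loop
def initA : List (List Int) → List Int → List (List Int) → List (List Int) →
    Option (List Int × List (List Int) × List (List Int))
  | [], s, rs, xs => some (s, rs, xs)
  | rc :: rest, s, rs, xs =>
    match PySem.List.pyGet? rc (-1) with
    | none => none                                     -- IndexError on rchoice[-1] (outside Pre_)
    | some last =>
      if last = 0 then initA rest s rs (xs ++ [PySem.List.slice rc none (some (-1))])
      else if rc.length = 1 then
        if s.contains (PySem.List.pyGetD rc 0 0) then none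
        else initA rest (s ++ [PySem.List.pyGetD rc 0 0]) rs xs
      else initA rest s (rs ++ [rc]) xs

def simplify_room_lists (roomlists : List (List Int)) :
    Option (List Int × List (List Int) × List (List Int)) :=
  match initA roomlists [] [] [] with
  | none => none
  | some (s, rooms, xrooms) => whileA s 0 rooms xrooms

-- ===== PORT B =====
-- first loop of Source B: classification, with the claimed-set alongside
def initB : List (List Int) → List Int → PySem.Set Int → List (List Int) → List (List Int) →
    Option (List Int × PySem.Set Int × List (List Int) × List (List Int))
  | [], s, cl, rs, xs => some (s, cl, rs, xs)
  | rc :: rest, s, cl, rs, xs =>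
    match PySem.List.pyGet? rc (-1) with
    | none => none                                     -- IndexError on rc[-1] (outside Pre_)
    | some last =>
      if last = 0 then initB rest s cl rs (xs ++ [PySem.List.slice rc none (some (-1))])
      else if rc.length = 1 then
        if PySem.Set.contains cl (PySem.List.pyGetD rc 0 0) then none
        else initB rest (s ++ [PySem.List.pyGetD rc 0 0])
          (PySem.Set.add cl (PySem.List.pyGetD rc 0 0)) rs xs
      else initB rest s cl (rs ++ [rc]) xs

-- `for j, rl in enumerate(rooms0): live[j] = rl; for rr in dict.fromkeys(rl): index.setdefault(rr, []).append(j)`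
def buildB (rooms0 : List (List Int)) : PySem.Dict Int (List Int) × PySem.Dict Int (List Int) :=
  (PySem.List.enumerate rooms0 0).foldl
    (fun d p =>
      (d.1.insert p.1 p.2,
       (PySem.List.dedup p.2).foldl (fun ix rr => ix.modify rr [] (· ++ [p.1])) d.2))
    (PySem.Dict.empty, PySem.Dict.empty)

-- `for j in index.get(r, []): …`
def innerB (r : Int) : List Int → PySem.Dict Int (List Int) → PySem.Set Int → List Int →
    Option (PySem.Dict Int (List Int) × PySem.Set Int × List Int)
  | [], live, cl, s => some (live, cl, s)
  | j :: rest, live, cl, s =>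
    match live.get? j with
    | none => innerB r rest live cl s                  -- list no longer live
    | some rl =>
      match PySem.List.remove? rl r with
      | none => none    -- rl2.remove(r) would raise ValueError; unreachable: j is indexed under r
      | some rl2 =>
        if rl2.length = 1 then
          if PySem.Set.contains cl (PySem.List.pyGetD rl2 0 0) then none
          else innerB r rest (live.erase j) (PySem.Set.add cl (PySem.List.pyGetD rl2 0 0))
            (s ++ [PySem.List.pyGetD rl2 0 0])
        else innerB r rest (live.insert j rl2) cl s

-- termination fact for the worklist loop (cited in decreasing_by)
lemma innerB_conserve (r : Int) : ∀ (idx : List Int) (live : PySem.Dict Int (List Int))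
    (cl : PySem.Set Int) (s : List Int) (out : PySem.Dict Int (List Int) × PySem.Set Int × List Int),
    innerB r idx live cl s = some out →
    out.1.items.length + out.2.2.length ≤ live.items.length + s.length := by
  intro idx
  induction idx with
  | nil => intro live cl s out h; cases h; simp
  | cons j rest ih =>
    intro live cl s out h
    cases hg : live.get? j with
    | none => simp only [innerB, hg] at h; exact ih _ _ _ _ h
    | some rl =>
      cases hrm : PySem.List.remove? rl r with
      | none => simp only [innerB, hg, hrm] at h; cases h
      | some rl2 =>
        simp only [innerB, hg, hrm] at h
        have hmem : ∃ p ∈ live.items, (p.1 == j) = true := by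
          simp only [PySem.Dict.get?, Option.map_eq_some_iff] at hg
          obtain ⟨p, hp, -⟩ := hg
          exact ⟨p, List.mem_of_find?_eq_some hp, by simpa using (List.find?_some hp)⟩
        by_cases h1 : rl2.length = 1
        · rw [if_pos h1] at h
          by_cases h2 : PySem.Set.contains cl (PySem.List.pyGetD rl2 0 0) = true
          · rw [if_pos h2] at h; cases h
          · rw [if_neg h2] at h
            have hlen : (live.erase j).items.length < live.items.length := by
              obtain ⟨p, hp, hpj⟩ := hmem
              have hs : ((live.erase j).items).Sublist live.items := by
                simp only [PySem.Dict.erase]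
                exact List.filter_sublist
              rcases Nat.lt_or_ge (live.erase j).items.length live.items.length with hlt | hge
              · exact hlt
              · exfalso
                have heq := hs.eq_of_length (le_antisymm hs.length_le hge)
                have : p ∈ (live.erase j).items := heq ▸ hp
                simp only [PySem.Dict.erase, List.mem_filter] at this
                simp [hpj] at this
            have := ih _ _ _ _ h; simp at this ⊢; omega
        · rw [if_neg h1] at h
          have hins : (live.insert j rl2).items.length = live.items.length := by
            have hc : live.contains j = true := by
              rw [PySem.Dict.contains_eq_isSome_get?, hg]; rfl
            simp [PySem.Dict.insert, hc]
          have := ih _ _ _ _ h; simp at this ⊢; omega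

-- final single filtering pass over a flexible list
def onepassB (cl : PySem.Set Int) (xl : List Int) : List Int :=
  (xl.foldl
    (fun (p : List Int × PySem.Set Int) x =>
      if PySem.Set.contains cl x && !(PySem.Set.contains p.2 x) then (p.1, PySem.Set.add p.2 x)
      else (p.1 ++ [x], p.2))
    ([], PySem.Set.empty)).1

-- `lst.sort(key=lambda l: (len(l), l))`
def sortKeyB (xs : List (List Int)) : List (List Int) :=
  PySem.List.sorted2 xs (fun l => PySem.List.len l) (fun l => l) false

-- `while qi < len(srooms): …`
def loopB (index : PySem.Dict Int (List Int)) (xrooms0 : List (List Int))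
    (srooms : List Int) (qi : Nat) (cl : PySem.Set Int) (live : PySem.Dict Int (List Int)) :
    Option (List Int × List (List Int) × List (List Int)) :=
  if h : qi < srooms.length then
    match hp : innerB srooms[qi] (index.getD srooms[qi] []) live cl srooms with
    | none => none
    | some (live', cl', srooms') => loopB index xrooms0 srooms' (qi + 1) cl' live'
  else
    some (srooms, sortKeyB live.values, sortKeyB (xrooms0.map (fun xl => onepassB cl xl)))
termination_by srooms.length + live.items.length - qi
decreasing_by
  have h2 := innerB_conserve srooms[qi] _ live cl srooms _ hp
  simp at h2; omega

def simplify_room_lists_alt (roomlists : List (List Int)) :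
    Option (List Int × List (List Int) × List (List Int)) :=
  match initB roomlists [] PySem.Set.empty [] [] with
  | none => none
  | some (s, cl, rooms0, xrooms0) =>
    let bi := buildB rooms0
    loopB bi.2 xrooms0 s 0 cl bi.1

-- ===== PRECONDITION & SPEC =====
-- Pre_ excludes inputs containing an empty inner list: on those both A and B raise IndexError at
-- rchoice[-1] — except when an earlier duplicate single room makes both return None first.
def Pre_simplify_room_lists (roomlists : List (List Int)) : Prop :=
  ∀ rc ∈ roomlists, rc ≠ []
instance (roomlists : List (List Int)) : Decidable (Pre_simplify_room_lists roomlists) := by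
  unfold Pre_simplify_room_lists; infer_instance

def pvWitness_simplify_room_lists : List (List Int) := [[1], [2, 3], [1, 4, 0]]

def Spec_simplify_room_lists (roomlists : List (List Int))
    (out : Option (List Int × List (List Int) × List (List Int))) : Prop :=
  out = simplify_room_lists_alt roomlists
instance (roomlists : List (List Int)) (out : Option (List Int × List (List Int) × List (List Int))) :
    Decidable (Spec_simplify_room_lists roomlists out) := by
  unfold Spec_simplify_room_lists; infer_instance

-- ===== CLAIM (what is proved, stated in full; the proofs are below) =====
def Claim_equal_simplify_room_lists : Prop := ∀ (roomlists : List (List Int)),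
  Dom_simplify_room_lists roomlists → Pre_simplify_room_lists roomlists →
  Spec_simplify_room_lists roomlists (simplify_room_lists roomlists)

-- ===== LEMMAS AND PROOFS =====

-- the common description of one propagation step over the live entries (proof-side only)
def specPass (r : Int) : List (Int × List Int) → List Int → Option (List (Int × List Int) × List Int)
  | [], s => some ([], s)
  | (j, rl) :: rest, s =>
    match PySem.List.remove? rl r with
    | none => (specPass r rest s).map (fun p => ((j, rl) :: p.1, p.2))
    | some rl2 =>
      if rl2.length = 1 then
        if s.contains (PySem.List.pyGetD rl2 0 0) then none
        else specPass r rest (s ++ [PySem.List.pyGetD rl2 0 0])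
      else (specPass r rest s).map (fun p => ((j, rl2) :: p.1, p.2))

-- remove the first occurrence of each element of D, sequentially
def reduceBy (D : List Int) (xl : List Int) : List Int :=
  D.foldl (fun l v => (PySem.List.remove? l v).getD l) xl

-- remove the first occurrence of each member of the (unordered) set D, in one pass
def gRem (D : List Int) : List Int → List Int
  | [] => []
  | x :: xs => if x ∈ D then gRem (D.erase x) xs else x :: gRem D xs

lemma passA_spec (r : Int) : ∀ (entries : List (Int × List Int)) (acc : List (List Int)) (s : List Int),
    passA r (entries.map (fun p => p.2)) acc s =
      (specPass r entries s).map (fun p => (acc ++ p.1.map (fun q => q.2), p.2)) := by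
  intro entries
  induction entries with
  | nil => intro acc s; simp [passA, specPass]
  | cons p rest ih =>
    intro acc s
    obtain ⟨j, rl⟩ := p
    cases hrm : PySem.List.remove? rl r with
    | none =>
      simp only [List.map_cons, passA, specPass, hrm]
      rw [ih]
      cases hsp : specPass r rest s <;> simp
    | some rl2 =>
      by_cases h1 : rl2.length = 1
      · by_cases h2 : PySem.List.pyGetD rl2 0 0 ∈ s
        · simp [List.map_cons, passA, specPass, hrm, h1, h2]
        · simp only [List.map_cons, passA, specPass, hrm, h1, if_true, List.elem_eq_contains,
            decide_eq_true_eq, List.contains_iff_mem, h2, if_false]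
          rw [ih]
      · simp only [List.map_cons, passA, specPass, hrm, if_neg h1]
        rw [ih]
        cases hsp : specPass r rest s <;> simp

lemma specPass_pre (r : Int) : ∀ (pre rest : List (Int × List Int)) (s : List Int),
    (∀ p ∈ pre, r ∉ p.2) →
    specPass r (pre ++ rest) s = (specPass r rest s).map (fun p => (pre ++ p.1, p.2)) := by
  intro pre
  induction pre with
  | nil => intro rest s _; cases hsp : specPass r rest s <;> simp [hsp]
  | cons p pre ih =>
    intro rest s hpre
    obtain ⟨j, rl⟩ := p
    have hr : r ∉ rl := hpre (j, rl) (by simp)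
    have hrm : PySem.List.remove? rl r = none := by
      rw [PySem.List.remove?_eq_none_iff]; exact hr
    simp only [List.cons_append, specPass, hrm]
    rw [ih _ _ (fun q hq => hpre q (by simp [hq]))]
    cases hsp : specPass r rest s <;> simp [hsp]

lemma innerB_spec (r : Int) : ∀ (idx : List Int) (front entries : List (Int × List Int)) (s : List Int),
    ((front ++ entries).map (fun p => p.1)).Nodup →
    (entries.map (fun p => p.1)).Pairwise (· < ·) →
    idx.Pairwise (· < ·) →
    (∀ j ∈ idx, j ∉ front.map (fun p => p.1)) →
    (∀ p ∈ entries, r ∈ p.2 → p.1 ∈ idx) →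
    (∀ p ∈ entries, p.1 ∈ idx → r ∈ p.2) →
    innerB r idx ⟨front ++ entries⟩ s s =
      (specPass r entries s).map (fun p => (⟨front ++ p.1⟩, p.2, p.2)) := by
  intro idx
  induction idx with
  | nil =>
    intro front entries s h1 h2 h3 h4 h5 h6
    have hnor : ∀ p ∈ entries, r ∉ p.2 := fun p hp hr => by simpa using h5 p hp hr
    have hsp : specPass r entries s = some (entries, s) := by
      have := specPass_pre r entries [] s hnor
      simpa [specPass] using this
    simp [innerB, hsp]
  | cons j rest ih =>
    intro front entries s h1 h2 h3 h4 h5 h6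
    have hjfront : j ∉ front.map (fun p => p.1) := h4 j (by simp)
    have hfrontnone : front.find? (fun p => p.1 == j) = none := by
      rw [List.find?_eq_none]
      intro p hp hpj
      exact hjfront (by
        have : p.1 = j := by simpa using hpj
        exact this ▸ List.mem_map_of_mem hp)
    by_cases hj : j ∈ entries.map (fun p => p.1)
    · -- j is a live key
      have hex : (entries.find? (fun p => p.1 == j)).isSome = true := by
        rw [List.find?_isSome]
        obtain ⟨p, hp, hpj⟩ := List.mem_map.mp hj
        exact ⟨p, hp, by simp [hpj]⟩
      obtain ⟨q, hq⟩ := Option.isSome_iff_exists.mp hex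
      obtain ⟨hqj', pre, post, hsplit, hprenoj⟩ := List.find?_eq_some_iff_append.mp hq
      have hqj : q.1 = j := by simpa using hqj'
      obtain ⟨rl, hq2⟩ : ∃ rl, q = (j, rl) := ⟨q.2, by rw [← hqj]⟩
      subst hq2
      subst hsplit
      -- order facts
      have hkeys := h2
      rw [List.map_append, List.map_cons, List.pairwise_append] at hkeys
      obtain ⟨hprepw, hconspw, hcross⟩ := hkeys
      have hpostpw : (post.map (fun p => p.1)).Pairwise (· < ·) := (List.pairwise_cons.mp hconspw).2
      have hpostgt : ∀ b ∈ post.map (fun p => p.1), j < b := (List.pairwise_cons.mp hconspw).1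
      have hprelt : ∀ a ∈ pre.map (fun p => p.1), a < j := fun a ha => hcross a ha j (by simp)
      have hrestgt : ∀ b ∈ rest, j < b := (List.pairwise_cons.mp h3).1
      have hrestpw : rest.Pairwise (· < ·) := (List.pairwise_cons.mp h3).2
      have hprenor : ∀ p ∈ pre, r ∉ p.2 := by
        intro p hp hr
        have hmem : p.1 ∈ j :: rest := h5 p (by simp [hp]) hr
        have hlt : p.1 < j := hprelt p.1 (List.mem_map_of_mem hp)
        rcases List.mem_cons.mp hmem with he | ht
        · omega
        · have := hrestgt p.1 ht; omega
      have hrmem : r ∈ rl := h6 (j, rl) (by simp) (by simp)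
      have hrm : PySem.List.remove? rl r = some (rl.erase r) :=
        PySem.List.remove?_eq_some_erase rl r hrmem
      have hget : (PySem.Dict.mk (front ++ (pre ++ (j, rl) :: post)) : PySem.Dict Int (List Int)).get? j
          = some rl := by
        simp only [PySem.Dict.get?, List.find?_append, hfrontnone, Option.none_or, hq]
        rfl
      have hRHS : specPass r (pre ++ (j, rl) :: post) s
          = (specPass r ((j, rl) :: post) s).map (fun p => (pre ++ p.1, p.2)) :=
        specPass_pre r pre _ s hprenor
      by_cases hlen : (rl.erase r).length = 1
      · by_cases hrx : PySem.List.pyGetD (rl.erase r) 0 0 ∈ s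
        · -- conflict: both sides are none
          simp only [innerB, hget, hrm, if_pos hlen]
          rw [if_pos (by simpa [PySem.Set.contains] using hrx)]
          rw [hRHS]
          simp only [specPass, hrm, if_pos hlen]
          rw [if_pos (by simpa using hrx)]
          rfl
        · -- new single room: entry j removed, rx claimed
          simp only [innerB, hget, hrm, if_pos hlen]
          rw [if_neg (by simpa [PySem.Set.contains] using hrx),
            PySem.Set.add_of_not_mem hrx]
          have hfilf : front.filter (fun p => !(p.1 == j)) = front := by
            apply List.filter_eq_self.mpr
            intro p hp
            have hne : p.1 ≠ j := fun hc => hjfront (hc ▸ List.mem_map_of_mem hp)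
            simp [hne]
          have hfilpre : pre.filter (fun p => !(p.1 == j)) = pre := by
            apply List.filter_eq_self.mpr
            intro p hp
            have := hprelt p.1 (List.mem_map_of_mem hp)
            have hne : p.1 ≠ j := by omega
            simp [hne]
          have hfilpost : post.filter (fun p => !(p.1 == j)) = post := by
            apply List.filter_eq_self.mpr
            intro p hp
            have := hpostgt p.1 (List.mem_map_of_mem hp)
            have hne : p.1 ≠ j := by omega
            simp [hne]
          have hconsfil : ((j, rl) :: post).filter (fun p => !(p.1 == j)) = post := by
            rw [List.filter_cons_of_neg (by simp)]
            exact hfilpost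
          have herase : ((PySem.Dict.mk (front ++ (pre ++ (j, rl) :: post)) :
              PySem.Dict Int (List Int)).erase j)
              = PySem.Dict.mk ((front ++ pre) ++ post) := by
            simp only [PySem.Dict.erase, List.filter_append, hfilf, hfilpre, hconsfil]
            simp [List.append_assoc]
          rw [herase]
          rw [ih (front ++ pre) post (s ++ [PySem.List.pyGetD (rl.erase r) 0 0])]
          · rw [hRHS]
            simp only [specPass, hrm, if_pos hlen]
            rw [if_neg (by simpa using hrx)]
            cases specPass r post (s ++ [PySem.List.pyGetD (rl.erase r) 0 0]) <;>
              simp [List.append_assoc]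
          · -- keys nodup
            refine h1.sublist ?_
            simp only [List.map_append, List.map_cons, List.append_assoc]
            exact ((List.sublist_cons_self _ _).append_left _).append_left _
          · exact hpostpw
          · exact hrestpw
          · intro j' hj'
            simp only [List.map_append, List.mem_append]
            rintro (hf | hpre)
            · exact h4 j' (by simp [hj']) hf
            · have h1l := hprelt j' hpre
              have h2l := hrestgt j' hj'
              omega
          · intro p hp hr
            have hmem : p.1 ∈ j :: rest := h5 p (by simp [hp]) hr
            rcases List.mem_cons.mp hmem with he | ht
            · have := hpostgt p.1 (List.mem_map_of_mem hp); omega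
            · exact ht
          · intro p hp hpr
            exact h6 p (by simp [hp]) (by simp [hpr])
      · -- entry j keeps a shorter list
        simp only [innerB, hget, hrm, if_neg hlen]
        have hcont : (PySem.Dict.mk (front ++ (pre ++ (j, rl) :: post)) :
            PySem.Dict Int (List Int)).contains j = true := by
          rw [PySem.Dict.contains_eq_isSome_get?, hget]; rfl
        have hmapf : front.map (fun p => if p.1 == j then (j, rl.erase r) else p) = front := by
          rw [List.map_congr_left (g := fun p => p), List.map_id']
          intro p hp
          have hne : p.1 ≠ j := fun hc => hjfront (hc ▸ List.mem_map_of_mem hp)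
          simp [hne]
        have hmappre : pre.map (fun p => if p.1 == j then (j, rl.erase r) else p) = pre := by
          rw [List.map_congr_left (g := fun p => p), List.map_id']
          intro p hp
          have := hprelt p.1 (List.mem_map_of_mem hp)
          have hne : p.1 ≠ j := by omega
          simp [hne]
        have hmappost : post.map (fun p => if p.1 == j then (j, rl.erase r) else p) = post := by
          rw [List.map_congr_left (g := fun p => p), List.map_id']
          intro p hp
          have := hpostgt p.1 (List.mem_map_of_mem hp)
          have hne : p.1 ≠ j := by omega
          simp [hne]
        have hins : ((PySem.Dict.mk (front ++ (pre ++ (j, rl) :: post)) :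
            PySem.Dict Int (List Int)).insert j (rl.erase r))
            = PySem.Dict.mk ((front ++ pre ++ [(j, rl.erase r)]) ++ post) := by
          simp only [PySem.Dict.insert, hcont, if_true, List.map_append, List.map_cons,
            hmapf, hmappre, hmappost]
          simp [List.append_assoc]
        rw [hins]
        rw [ih (front ++ pre ++ [(j, rl.erase r)]) post s]
        · rw [hRHS]
          simp only [specPass, hrm, if_neg hlen]
          cases specPass r post s <;> simp [List.append_assoc]
        · -- keys are the same as before, only the value changed
          have : ((front ++ pre ++ [(j, rl.erase r)]) ++ post).map (fun p => p.1)
              = (front ++ (pre ++ (j, rl) :: post)).map (fun p => p.1) := by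
            simp [List.append_assoc]
          rw [this]; exact h1
        · exact hpostpw
        · exact hrestpw
        · intro j' hj'
          simp only [List.map_append, List.mem_append, List.map_cons]
          have h2l := hrestgt j' hj'
          rintro ((hf | hpre) | hone)
          · exact h4 j' (by simp [hj']) hf
          · have h1l := hprelt j' hpre; omega
          · simp at hone; omega
        · intro p hp hr
          have hmem : p.1 ∈ j :: rest := h5 p (by simp [hp]) hr
          rcases List.mem_cons.mp hmem with he | ht
          · have := hpostgt p.1 (List.mem_map_of_mem hp); omega
          · exact ht
        · intro p hp hpr
          exact h6 p (by simp [hp]) (by simp [hpr])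
    · -- j is not a live key: skip
      have hentnone : entries.find? (fun p => p.1 == j) = none := by
        rw [List.find?_eq_none]
        intro p hp hpj
        exact hj (by
          have : p.1 = j := by simpa using hpj
          exact this ▸ List.mem_map_of_mem hp)
      have hget : (PySem.Dict.mk (front ++ entries) : PySem.Dict Int (List Int)).get? j = none := by
        simp only [PySem.Dict.get?, List.find?_append, hfrontnone, Option.none_or, hentnone,
          Option.map_none]
      simp only [innerB, hget]
      refine ih front entries s h1 h2 (List.pairwise_cons.mp h3).2 ?_ ?_ ?_
      · exact fun j' hj' => h4 j' (by simp [hj'])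
      · intro p hp hr
        have hmem : p.1 ∈ j :: rest := h5 p hp hr
        rcases List.mem_cons.mp hmem with he | ht
        · exact absurd (he ▸ List.mem_map_of_mem hp) hj
        · exact ht
      · intro p hp hpr
        exact h6 p hp (by simp [hpr])

lemma specPass_conserve (r : Int) : ∀ (entries : List (Int × List Int)) (s : List Int) out,
    specPass r entries s = some out →
    out.1.length + out.2.length = entries.length + s.length := by
  intro entries
  induction entries with
  | nil => intro s out h; cases h; simp
  | cons p rest ih =>
    intro s out h
    obtain ⟨j, rl⟩ := p
    cases hrm : PySem.List.remove? rl r with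
    | none =>
      simp only [specPass, hrm] at h
      cases hsp : specPass r rest s with
      | none => rw [hsp] at h; cases h
      | some q =>
        rw [hsp] at h; cases h
        have := ih _ _ hsp; simp at this ⊢; omega
    | some rl2 =>
      by_cases h1 : rl2.length = 1
      · by_cases h2 : PySem.List.pyGetD rl2 0 0 ∈ s
        · simp [specPass, hrm, h1, h2] at h
        · simp only [specPass, hrm, h1, if_true] at h
          rw [if_neg (by simp [h2])] at h
          have := ih _ _ h; simp at this ⊢; omega
      · simp only [specPass, hrm, if_neg h1] at h
        cases hsp : specPass r rest s with
        | none => rw [hsp] at h; cases h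
        | some q =>
          rw [hsp] at h; cases h
          have := ih _ _ hsp; simp at this ⊢; omega

-- surviving entries: same key, value kept or with the first r erased; s extended; Nodup preserved
lemma specPass_entries (r : Int) : ∀ (entries : List (Int × List Int)) (s : List Int) out,
    specPass r entries s = some out →
    (∃ t, out.2 = s ++ t) ∧ (s.Nodup → out.2.Nodup) ∧
    (out.1.map (fun p => p.1)).Sublist (entries.map (fun p => p.1)) ∧
    (∀ p ∈ out.1, ∃ rl, (p.1, rl) ∈ entries ∧ (p.2 = rl ∨ p.2 = rl.erase r)) := by
  intro entries
  induction entries with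
  | nil =>
    intro s out h; cases h
    exact ⟨⟨[], by simp⟩, fun h => h, by simp, by simp⟩
  | cons p rest ih =>
    intro s out h
    obtain ⟨j, rl⟩ := p
    cases hrm : PySem.List.remove? rl r with
    | none =>
      simp only [specPass, hrm] at h
      cases hsp : specPass r rest s with
      | none => rw [hsp] at h; cases h
      | some q =>
        rw [hsp] at h; cases h
        obtain ⟨⟨t, ht⟩, hnd, hsub, hval⟩ := ih _ _ hsp
        refine ⟨⟨t, by simpa using ht⟩, hnd, ?_, ?_⟩
        · simp only [List.map_cons]; exact hsub.cons₂ j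
        · intro e he
          rcases List.mem_cons.mp he with rfl | he'
          · exact ⟨rl, by simp⟩
          · obtain ⟨rl', hm, hv⟩ := hval e he'
            exact ⟨rl', by simp [hm], hv⟩
    | some rl2 =>
      by_cases h1 : rl2.length = 1
      · by_cases h2 : PySem.List.pyGetD rl2 0 0 ∈ s
        · simp [specPass, hrm, h1, h2] at h
        · simp only [specPass, hrm, h1, if_true] at h
          rw [if_neg (by simp [h2])] at h
          obtain ⟨⟨t, ht⟩, hnd, hsub, hval⟩ := ih _ _ h
          refine ⟨⟨PySem.List.pyGetD rl2 0 0 :: t, by simp [ht]⟩, ?_, ?_, ?_⟩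
          · intro hs
            apply hnd
            simp only [List.nodup_append]
            exact ⟨hs, List.nodup_singleton _, by
              intro a ha b hb
              rw [List.mem_singleton] at hb; subst hb
              exact fun he => h2 (he ▸ ha)⟩
          · exact hsub.trans (List.sublist_cons_self _ _)
          · intro e he
            obtain ⟨rl', hm, hv⟩ := hval e he
            exact ⟨rl', by simp [hm], hv⟩
      · simp only [specPass, hrm, if_neg h1] at h
        cases hsp : specPass r rest s with
        | none => rw [hsp] at h; cases h
        | some q =>
          rw [hsp] at h; cases h
          obtain ⟨⟨t, ht⟩, hnd, hsub, hval⟩ := ih _ _ hsp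
          refine ⟨⟨t, by simpa using ht⟩, hnd, ?_, ?_⟩
          · simp only [List.map_cons]; exact hsub.cons₂ j
          · intro e he
            rcases List.mem_cons.mp he with rfl | he'
            · refine ⟨rl, by simp, Or.inr ?_⟩
              have hrmem : r ∈ rl := by
                by_contra hc
                rw [← PySem.List.remove?_eq_none_iff (xs := rl) (v := r)] at hc
                simp [hc] at hrm
              have := PySem.List.remove?_eq_some_erase (xs := rl) (v := r) hrmem
              rw [hrm] at this
              exact Option.some_inj.mp this
            · obtain ⟨rl', hm, hv⟩ := hval e he'
              exact ⟨rl', by simp [hm], hv⟩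

-- index characterisation ---------------------------------------------------
def idxSpec (rooms0 : List (List Int)) (r : Int) : List Int :=
  ((PySem.List.enumerate rooms0 0).filter (fun p => decide (r ∈ p.2))).map (fun p => p.1)

lemma enumerate_fst_nodup (rooms0 : List (List Int)) :
    ((PySem.List.enumerate rooms0 0).map (fun p => p.1)).Nodup := by
  have := List.Pairwise.map (fun p => p.1) (fun (a b : Int × List Int) h => h)
    (PySem.List.pairwise_lt_enumerate rooms0 0)
  exact this.imp (fun h => ne_of_lt h)

lemma buildB_eq (rooms0 : List (List Int)) :
    buildB rooms0 =
      ((PySem.List.enumerate rooms0 0).foldl (fun d p => d.insert p.1 p.2) PySem.Dict.empty,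
       (PySem.List.enumerate rooms0 0).foldl
         (fun ix p => (PySem.List.dedup p.2).foldl (fun ix rr => ix.modify rr [] (· ++ [p.1])) ix)
         PySem.Dict.empty) := by
  unfold buildB
  exact PySem.List.foldl_prod_mk (fun d (p : Int × List Int) => PySem.Dict.insert d p.1 p.2)
    (fun ix (p : Int × List Int) =>
      (PySem.List.dedup p.2).foldl (fun ix rr => ix.modify rr [] (· ++ [p.1])) ix)
    (PySem.List.enumerate rooms0) PySem.Dict.empty PySem.Dict.empty

lemma buildB_fst (rooms0 : List (List Int)) :
    (buildB rooms0).1.items = PySem.List.enumerate rooms0 0 := by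
  rw [buildB_eq]
  rw [PySem.Dict.items_foldl_insert_fresh (PySem.List.enumerate rooms0)
    (fun p => p.1) (fun p => p.2) PySem.Dict.empty
    (by intro a ha; simp [PySem.Dict.contains_empty]) (enumerate_fst_nodup rooms0)]
  simp [PySem.Dict.empty]

lemma filter_beq_nodup (l : List Int) (a : Int) (h : l.Nodup) :
    l.filter (fun x => x == a) = if a ∈ l then [a] else [] := by
  induction l with
  | nil => simp
  | cons x xs ih =>
    rcases List.nodup_cons.mp h with ⟨hx, hxs⟩
    by_cases hxa : x = a
    · subst hxa
      simp [List.filter_cons, ih hxs, hx]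
    · simp only [List.filter_cons, List.mem_cons]
      rw [if_neg (by simp [hxa]), ih hxs]
      by_cases ha : a ∈ xs <;> simp [ha, Ne.symm hxa]

lemma indexFold_getD : ∀ (l : List (Int × List Int)) (d : PySem.Dict Int (List Int)) (r : Int),
    ((l.foldl (fun ix p =>
        (PySem.List.dedup p.2).foldl (fun ix rr => ix.modify rr [] (· ++ [p.1])) ix) d).getD r [])
      = d.getD r [] ++ ((l.filter (fun p => decide (r ∈ p.2))).map (fun p => p.1)) := by
  intro l
  induction l with
  | nil => intro d r; simp
  | cons p rest ih =>
    intro d r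
    obtain ⟨j, rl⟩ := p
    simp only [List.foldl_cons]
    rw [ih]
    have hinner : ((PySem.List.dedup rl).foldl (fun ix rr => ix.modify rr [] (· ++ [j])) d).getD r []
        = d.getD r [] ++ (if r ∈ rl then [j] else []) := by
      rw [← List.foldl_map (f := fun rr => ((rr : Int), j))
        (g := fun (ix : PySem.Dict Int (List Int)) (q : Int × Int) => ix.modify q.1 [] (· ++ [q.2]))]
      rw [PySem.Dict.getD_foldl_modify_append]
      congr 1
      rw [List.filter_map]
      have : (PySem.List.dedup rl).filter ((fun q : Int × Int => q.1 == r) ∘ (fun rr => (rr, j)))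
          = (PySem.List.dedup rl).filter (fun x => x == r) := by rfl
      rw [this, filter_beq_nodup _ _ (by simpa using PySem.List.nodup_dedup rl)]
      by_cases hr : r ∈ rl <;> simp [hr, PySem.List.mem_dedup]
    rw [hinner]
    by_cases hr : r ∈ rl <;> simp [hr]

lemma buildB_snd (rooms0 : List (List Int)) (r : Int) :
    (buildB rooms0).2.getD r [] = idxSpec rooms0 r := by
  rw [buildB_eq]
  simp only [idxSpec]
  rw [indexFold_getD]
  simp [PySem.Dict.getD_empty]

lemma idxSpec_pairwise (rooms0 : List (List Int)) (r : Int) :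
    (idxSpec rooms0 r).Pairwise (· < ·) := by
  exact List.Pairwise.map _ (fun a b h => h)
    ((PySem.List.pairwise_lt_enumerate rooms0 0).sublist List.filter_sublist)

lemma mem_idxSpec (rooms0 : List (List Int)) (r : Int) (j : Int) :
    j ∈ idxSpec rooms0 r ↔ ∃ (k : Nat) (hk : k < rooms0.length), j = (k : Int) ∧ r ∈ rooms0[k] := by
  simp only [idxSpec, List.mem_map, List.mem_filter, PySem.List.mem_enumerate_iff]
  constructor
  · rintro ⟨p, ⟨⟨k, hk, rfl⟩, hr⟩, rfl⟩
    exact ⟨k, hk, by simpa using hr⟩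
  · rintro ⟨k, hk, rfl, hr⟩
    exact ⟨((k : Int), rooms0[k]), ⟨⟨k, hk, by simp⟩, by simpa using hr⟩, rfl⟩

-- sorting ------------------------------------------------------------------
lemma insertBy_map (dec : List Int → Int × List Int) (bp : Int × List Int → Int × List Int → Bool)
    (bk : List Int → List Int → Bool) (hb : ∀ a b, bp (dec a) (dec b) = bk a b) :
    ∀ (ys : List (List Int)) (x : List Int),
    PySem.List.insertBy bp (dec x) (ys.map dec) = (PySem.List.insertBy bk x ys).map dec := by
  intro ys
  induction ys with
  | nil => intro x; simp [PySem.List.insertBy]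
  | cons y ys ih =>
    intro x
    simp only [List.map_cons, PySem.List.insertBy]
    rw [hb]
    by_cases h : bk x y = true
    · simp [h]
    · simp only [h, if_false, Bool.false_eq_true, List.map_cons]
      rw [ih]

lemma foldl_insertBy_map (dec : List Int → Int × List Int) (bp : Int × List Int → Int × List Int → Bool)
    (bk : List Int → List Int → Bool) (hb : ∀ a b, bp (dec a) (dec b) = bk a b) :
    ∀ (xs acc : List (List Int)),
    List.foldl (fun a x => PySem.List.insertBy bp (dec x) a) (acc.map dec) xs
      = (List.foldl (fun a x => PySem.List.insertBy bk x a) acc xs).map dec := by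
  intro xs
  induction xs with
  | nil => intro acc; simp
  | cons x xs ih =>
    intro acc
    simp only [List.foldl_cons]
    rw [insertBy_map dec bp bk hb, ih]

lemma sortPairsA_eq_sortKeyB (xs : List (List Int)) : sortPairsA xs = sortKeyB xs := by
  simp only [sortPairsA, sortKeyB, PySem.List.sorted2, Bool.false_eq_true, if_false]
  rw [List.foldl_map]
  have := foldl_insertBy_map (fun l => (PySem.List.len l, l))
    (fun a b => decide (a.1 < b.1) || !decide (b.1 < a.1) && decide (a.2 < b.2))
    (fun a b => decide (PySem.List.len a < PySem.List.len b) ||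
      !decide (PySem.List.len b < PySem.List.len a) && decide (a < b))
    (fun a b => rfl) xs []
  simp only [List.map_nil] at this
  rw [this, List.map_map]
  simp [Function.comp_def]

-- final xrooms pass --------------------------------------------------------
lemma gRem_nil_d : ∀ xl : List Int, gRem [] xl = xl := by
  intro xl; induction xl <;> simp [gRem, *]

lemma gRem_insert (v : Int) : ∀ (xl D : List Int), v ∉ D →
    gRem (v :: D) xl = gRem D ((PySem.List.remove? xl v).getD xl) := by
  intro xl
  induction xl with
  | nil => intro D h; simp [gRem, PySem.List.remove?]
  | cons x xs ih =>
    intro D hv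
    by_cases hxv : x = v
    · subst hxv
      rw [PySem.List.remove?_cons_self]
      simp [gRem, List.erase_cons_head]
    · rw [PySem.List.remove?_cons_of_ne xs hxv]
      by_cases hxD : x ∈ D
      · cases hrm : PySem.List.remove? xs v with
        | none =>
          simp only [hrm, Option.map_none, Option.getD_none]
          have hL : gRem (v :: D) (x :: xs) = gRem (v :: D.erase x) xs := by
            simp only [gRem, List.mem_cons]
            rw [if_pos (Or.inr hxD), List.erase_cons_tail (by simp [Ne.symm hxv])]
          have hR : gRem D (x :: xs) = gRem (D.erase x) xs := by
            simp only [gRem]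
            rw [if_pos hxD]
          rw [hL, hR, ih (D.erase x) (fun hc => hv (List.mem_of_mem_erase hc)), hrm]
          simp
        | some xs' =>
          simp only [hrm, Option.map_some, Option.getD_some]
          have hL : gRem (v :: D) (x :: xs) = gRem (v :: D.erase x) xs := by
            simp only [gRem, List.mem_cons]
            rw [if_pos (Or.inr hxD), List.erase_cons_tail (by simp [Ne.symm hxv])]
          have hR : gRem D (x :: xs') = gRem (D.erase x) xs' := by
            simp only [gRem]
            rw [if_pos hxD]
          rw [hL, hR, ih (D.erase x) (fun hc => hv (List.mem_of_mem_erase hc)), hrm]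
          simp
      · have hnx : x ∉ v :: D := by simp [hxv, hxD]
        cases hrm : PySem.List.remove? xs v with
        | none =>
          simp only [hrm, Option.map_none, Option.getD_none]
          simp only [gRem, if_neg hnx, if_neg hxD]
          rw [ih D hv, hrm]
          simp
        | some xs' =>
          simp only [hrm, Option.map_some, Option.getD_some]
          simp only [gRem, if_neg hnx, if_neg hxD]
          rw [ih D hv, hrm]
          simp

lemma gRem_eq_reduceBy : ∀ (D : List Int), D.Nodup → ∀ xl, gRem D xl = reduceBy D xl := by
  intro D
  induction D with
  | nil => intro _ xl; simp [gRem_nil_d, reduceBy]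
  | cons v D ih =>
    intro h xl
    rcases List.nodup_cons.mp h with ⟨hv, hD⟩
    rw [gRem_insert v xl D hv, ih hD]
    simp [reduceBy]

lemma onepass_fold (claimed : List Int) (hcl : claimed.Nodup) :
    ∀ (xl out : List Int) (seen : PySem.Set Int),
    (xl.foldl (fun (p : List Int × PySem.Set Int) x =>
      if PySem.Set.contains claimed x && !(PySem.Set.contains p.2 x) then (p.1, PySem.Set.add p.2 x)
      else (p.1 ++ [x], p.2)) (out, seen)).1
    = out ++ gRem (claimed.filter (fun v => !(PySem.Set.contains seen v))) xl := by
  intro xl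
  induction xl with
  | nil => intro out seen; simp [gRem]
  | cons x xs ih =>
    intro out seen
    by_cases hc : (PySem.Set.contains claimed x && !(PySem.Set.contains seen x)) = true
    · simp only [List.foldl_cons, hc, if_true]
      rw [ih]
      have hx : x ∈ claimed.filter (fun v => !(PySem.Set.contains seen v)) := by
        rw [List.mem_filter]
        rcases Bool.and_eq_true_iff.mp hc with ⟨h1, h2⟩
        exact ⟨by simpa [PySem.Set.contains] using h1, h2⟩
      have hseen : x ∉ seen := by
        rcases Bool.and_eq_true_iff.mp hc with ⟨-, h2⟩
        simpa [PySem.Set.contains] using h2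
      have hstep : gRem (claimed.filter (fun v => !(PySem.Set.contains seen v))) (x :: xs)
          = gRem ((claimed.filter (fun v => !(PySem.Set.contains seen v))).erase x) xs := by
        simp only [gRem]
        rw [if_pos hx]
      rw [hstep]
      congr 2
      have hnd : (claimed.filter (fun v => !(PySem.Set.contains seen v))).Nodup := hcl.filter _
      rw [hnd.erase_eq_filter, List.filter_filter]
      apply List.filter_congr
      intro v hval
      rw [PySem.Set.add_of_not_mem hseen]
      simp only [PySem.Set.contains, List.contains_append]
      cases hvs : List.contains seen v <;> cases hvx : v == x <;>
        simp_all [List.contains_eq_mem]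
    · simp only [List.foldl_cons, hc, if_false, Bool.false_eq_true]
      rw [ih]
      have hnx : x ∉ claimed.filter (fun v => !(PySem.Set.contains seen v)) := by
        rw [List.mem_filter]
        intro ⟨h1, h2⟩
        exact hc (Bool.and_eq_true_iff.mpr ⟨by simpa [PySem.Set.contains] using h1, h2⟩)
      have hstep : gRem (claimed.filter (fun v => !(PySem.Set.contains seen v))) (x :: xs)
          = x :: gRem (claimed.filter (fun v => !(PySem.Set.contains seen v))) xs := by
        simp only [gRem]
        rw [if_neg hnx]
      rw [hstep]
      simp

lemma onepassB_eq_reduceBy (cl : List Int) (xl : List Int) (h : cl.Nodup) :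
    onepassB cl xl = reduceBy cl xl := by
  unfold onepassB
  rw [onepass_fold cl h xl [] PySem.Set.empty]
  have : cl.filter (fun v => !(PySem.Set.contains PySem.Set.empty v)) = cl := by
    apply List.filter_eq_self.mpr
    intro a _; simp [PySem.Set.contains, PySem.Set.empty]
  rw [this, gRem_eq_reduceBy cl h xl]
  simp

-- init phase ---------------------------------------------------------------
lemma initB_eq_initA : ∀ (rest : List (List Int)) (s : List Int) (rs xs : List (List Int)),
    initB rest s s rs xs = (initA rest s rs xs).map (fun t => (t.1, t.1, t.2)) := by
  intro rest
  induction rest with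
  | nil => intro s rs xs; simp [initA, initB]
  | cons rc rest ih =>
    intro s rs xs
    cases hg : PySem.List.pyGet? rc (-1) with
    | none => simp [initA, initB, hg]
    | some last =>
      by_cases h0 : last = 0
      · simp only [initA, initB, hg, if_pos h0]; exact ih _ _ _
      · by_cases h1 : rc.length = 1
        · by_cases h2 : PySem.List.pyGetD rc 0 0 ∈ s
          · simp [initA, initB, hg, h0, h1, PySem.Set.contains, h2]
          · simp only [initA, initB, hg, if_neg h0, if_pos h1, PySem.Set.contains]
            rw [if_neg (by simp [h2]), if_neg (by simp [h2]),
              PySem.Set.add_of_not_mem h2]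
            exact ih _ _ _
        · simp only [initA, initB, hg, if_neg h0, if_neg h1]; exact ih _ _ _

lemma initA_nodup : ∀ (rest : List (List Int)) (s : List Int) (rs xs : List (List Int)) out,
    initA rest s rs xs = some out → s.Nodup → out.1.Nodup := by
  intro rest
  induction rest with
  | nil => intro s rs xs out h hs; cases h; exact hs
  | cons rc rest ih =>
    intro s rs xs out h hs
    cases hg : PySem.List.pyGet? rc (-1) with
    | none => simp [initA, hg] at h
    | some last =>
      by_cases h0 : last = 0
      · simp only [initA, hg, if_pos h0] at h; exact ih _ _ _ _ h hs
      · by_cases h1 : rc.length = 1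
        · by_cases h2 : PySem.List.pyGetD rc 0 0 ∈ s
          · simp [initA, hg, h0, h1, h2] at h
          · simp only [initA, hg, if_neg h0, if_pos h1] at h
            rw [if_neg (by simp [h2])] at h
            refine ih _ _ _ _ h ?_
            simp only [List.nodup_append]
            exact ⟨hs, List.nodup_singleton _, by
              intro a ha b hb
              rw [List.mem_singleton] at hb; subst hb
              exact fun he => h2 (he ▸ ha)⟩
        · simp only [initA, hg, if_neg h0, if_neg h1] at h; exact ih _ _ _ _ h hs

-- the main simulation ------------------------------------------------------
lemma getElem_not_mem_take (s : List Int) (i : Nat) (h : i < s.length) (hnd : s.Nodup) :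
    s[i] ∉ s.take i := by
  intro hmem
  obtain ⟨k, hk, hkeq⟩ := List.mem_iff_getElem.mp hmem
  have hk' : k < i := by
    have hk2 := hk
    rw [List.length_take] at hk2
    omega
  rw [List.getElem_take] at hkeq
  have := (List.Nodup.getElem_inj_iff hnd).mp hkeq
  omega

lemma reduceBy_snoc (D : List Int) (r : Int) (xl : List Int) :
    reduceBy (D ++ [r]) xl
      = (PySem.List.remove? (reduceBy D xl) r).getD (reduceBy D xl) := by
  simp [reduceBy, List.foldl_append]

lemma loop_final (rooms0 : List (List Int)) (s : List Int) (i : Nat)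
    (entries : List (Int × List Int)) (xrooms0 : List (List Int))
    (hge : ¬ i < s.length) (hnd : s.Nodup) :
    whileA s i (entries.map (fun p => p.2)) (xrooms0.map (reduceBy (s.take i))) =
      loopB (buildB rooms0).2 xrooms0 s i s ⟨entries⟩ := by
  rw [whileA, loopB]
  rw [dif_neg hge, dif_neg hge]
  have htake : s.take i = s := List.take_of_length_le (by omega)
  have hop : (fun xl => onepassB s xl) = reduceBy s :=
    funext (fun xl => onepassB_eq_reduceBy s xl hnd)
  simp only [htake, PySem.Dict.values, sortPairsA_eq_sortKeyB, hop]

lemma loop_sim (rooms0 : List (List Int)) :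
    ∀ (n : Nat) (s : List Int) (i : Nat) (entries : List (Int × List Int)) (xrooms0 : List (List Int)),
    s.length + entries.length - i ≤ n →
    s.Nodup →
    (entries.map (fun p => p.1)).Pairwise (· < ·) →
    (∀ p ∈ entries, ∃ (k : Nat) (hk : k < rooms0.length), p.1 = (k : Int) ∧
        ∀ v, v ∉ s.take i → (v ∈ p.2 ↔ v ∈ rooms0[k])) →
    whileA s i (entries.map (fun p => p.2)) (xrooms0.map (reduceBy (s.take i))) =
      loopB (buildB rooms0).2 xrooms0 s i s ⟨entries⟩ := by
  intro n
  induction n with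
  | zero =>
    intro s i entries xr hn hnd hpw hinv
    exact loop_final rooms0 s i entries xr (by omega) hnd
  | succ n ih =>
    intro s i entries xr hn hnd hpw hinv
    by_cases hi : i < s.length
    · -- one propagation step
      have hfresh : s[i] ∉ s.take i := getElem_not_mem_take s i hi hnd
      have hA := passA_spec s[i] entries [] s
      have hB : innerB s[i] ((buildB rooms0).2.getD s[i] []) ⟨[] ++ entries⟩ s s =
          (specPass s[i] entries s).map (fun p => (⟨[] ++ p.1⟩, p.2, p.2)) := by
        rw [buildB_snd]
        refine innerB_spec s[i] (idxSpec rooms0 s[i]) [] entries s ?_ ?_ ?_ ?_ ?_ ?_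
        · simpa using hpw.imp (fun h => ne_of_lt h)
        · exact hpw
        · exact idxSpec_pairwise rooms0 s[i]
        · simp
        · intro p hp hr
          obtain ⟨k, hk, hpk, hiff⟩ := hinv p hp
          exact (mem_idxSpec rooms0 s[i] p.1).mpr ⟨k, hk, hpk, (hiff s[i] hfresh).mp hr⟩
        · intro p hp hpr
          obtain ⟨k, hk, hpk, hiff⟩ := hinv p hp
          obtain ⟨k', hk', hpk', hr'⟩ := (mem_idxSpec rooms0 s[i] p.1).mp hpr
          have hkk : k' = k := by
            rw [hpk] at hpk'
            exact_mod_cast hpk'.symm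
          subst hkk
          exact (hiff s[i] hfresh).mpr hr'
      simp only [List.nil_append] at hB
      rw [whileA, loopB, dif_pos hi, dif_pos hi]
      cases hsp : specPass s[i] entries s with
      | none =>
        rw [hsp] at hA hB
        simp only [Option.map_none] at hA hB
        rw [hA, hB]
      | some q =>
        obtain ⟨es, s'⟩ := q
        rw [hsp] at hA hB
        simp only [Option.map_some, List.nil_append] at hA hB
        rw [hA, hB]
        obtain ⟨⟨t, ht⟩, hnd', hsub, hval⟩ := specPass_entries s[i] entries s _ hsp
        have hcons := specPass_conserve s[i] entries s _ hsp
        simp only at hcons ht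
        have htake' : s'.take (i + 1) = s.take i ++ [s[i]] := by
          rw [ht, List.take_append_of_le_length (by omega),
            List.take_succ_eq_append_getElem hi]
        have hxr : (xr.map (reduceBy (s.take i))).map
              (fun xl => (PySem.List.remove? xl s[i]).getD xl)
            = xr.map (reduceBy (s'.take (i + 1))) := by
          rw [List.map_map]
          apply List.map_congr_left
          intro xl _
          rw [htake', reduceBy_snoc]
          rfl
        rw [hxr]
        refine ih s' (i + 1) es xr (by omega) (hnd' hnd) (hpw.sublist hsub) ?_
        intro p hp
        obtain ⟨rl, hmem, hv⟩ := hval p hp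
        obtain ⟨k, hk, hpk, hiff⟩ := hinv (p.1, rl) hmem
        refine ⟨k, hk, hpk, ?_⟩
        intro v hv'
        rw [htake'] at hv'
        simp only [List.mem_append, List.mem_singleton] at hv'
        push_neg at hv'
        obtain ⟨hv1, hv2⟩ := hv'
        have hbase := hiff v hv1
        rcases hv with he | he
        · rw [he]; exact hbase
        · rw [he]
          rw [List.mem_erase_of_ne hv2]
          exact hbase
    · exact loop_final rooms0 s i entries xr hi hnd

-- ===== VERDICT (by name: the statement is the Claim_ definition above) =====
theorem simplify_room_lists_spec : Claim_equal_simplify_room_lists := by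
  intro roomlists hdom hpre
  unfold Spec_simplify_room_lists
  unfold simplify_room_lists simplify_room_lists_alt
  rw [show (PySem.Set.empty : PySem.Set Int) = ([] : List Int) from rfl, initB_eq_initA]
  cases hinit : initA roomlists [] [] [] with
  | none => simp
  | some out =>
    obtain ⟨s, rooms, xrooms⟩ := out
    simp only [Option.map_some]
    have hnd : s.Nodup := initA_nodup roomlists [] [] [] _ hinit List.nodup_nil
    have hlive : (buildB rooms).1 = ⟨PySem.List.enumerate rooms 0⟩ := by
      apply PySem.Dict.ext
      rw [buildB_fst]
    have hmain := loop_sim rooms (s.length + (PySem.List.enumerate rooms 0).length)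
      s 0 (PySem.List.enumerate rooms 0) xrooms (by omega) hnd
      (by
        exact List.Pairwise.map _ (fun a b h => h) (PySem.List.pairwise_lt_enumerate rooms 0))
      (by
        intro p hp
        obtain ⟨k, hk, hpe⟩ := (PySem.List.mem_enumerate_iff rooms 0 p).mp hp
        refine ⟨k, hk, by simp [hpe], ?_⟩
        intro v _
        simp [hpe])
    rw [PySem.List.map_snd_enumerate] at hmain
    have hred0 : xrooms.map (reduceBy (s.take 0)) = xrooms := by
      have hid : reduceBy (s.take 0) = fun xl : List Int => xl := by
        rw [List.take_zero]
        exact funext fun xl => rfl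
      rw [hid, List.map_id']
    rw [hred0] at hmain
    rw [hmain, hlive]
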